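-- pv_equiv track=rewrite | github.com/mjjunng/repo | programmers/dldbdud314/week7/인사고과.py | solution
-- ===== SOURCE A (Python) =====
-- def solution(scores):
--     scores = list(map(tuple, scores))
--     wh = scores[0]  # 원호 점수 저장
--     scores.sort(key=lambda x: (-x[0], x[1]))
--
--     # 인센티브 못 받는 점수 제거
--     to_remove = set()  # 인센티브 못 받는 점수 목록
--     for i in range(1, len(scores)):
--         a1, b1 = scores[i - 1]
--         a2, b2 = scores[i]
--         if a1 > a2 and b1 > b2:
--             to_remove.add(scores[i])
--
--     if wh in to_remove:  # 원호가 인센 못 받는 경우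
--         return -1
--
--     scores = [score for score in scores if score not in to_remove]  # 제거하고
--
--     # RANKING - 동석차 고려
--     scores = sorted(scores, key=lambda x: -sum(x))  # 합 기준 내림차순 정렬
--     cur_rank = 1
--     if scores[0] == wh:
--         return cur_rank
--     for i in range(1, len(scores)):
--         sum1 = sum(scores[i - 1])
--         sum2 = sum(scores[i])
--         if sum1 > sum2:
--             cur_rank = i + 1
--         if scores[i] == wh:  # 원호 점수인 경우
--             return cur_rank
-- ===== SOURCE B (Python) =====
-- def solution(scores):
--     scores = list(map(tuple, scores))
--     wh = scores[0]
--     scores.sort(key=lambda x: (-x[0], x[1]))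
--
--     to_remove = set()
--     for i in range(1, len(scores)):
--         a1, b1 = scores[i - 1]
--         a2, b2 = scores[i]
--         if a1 > a2 and b1 > b2:
--             to_remove.add(scores[i])
--
--     if wh in to_remove:
--         return -1
--
--     # competition rank = 1 + number of surviving scores with a strictly larger sum
--     wh_sum = sum(wh)
--     return 1 + sum(1 for s in scores if s not in to_remove and sum(s) > wh_sum)
-- ===== Notes on version B (the rewrite author's own statement) =====
-- stated objective: simpler
-- what changed: The second sort plus the stateful cur_rank walk is replaced by a single counting pass: rank = 1 + number of surviving scores whose sum is strictly larger than wonho's sum (the first phase - sort by (-a,b) and the adjacency removal set - is kept verbatim).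
import Mathlib
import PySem

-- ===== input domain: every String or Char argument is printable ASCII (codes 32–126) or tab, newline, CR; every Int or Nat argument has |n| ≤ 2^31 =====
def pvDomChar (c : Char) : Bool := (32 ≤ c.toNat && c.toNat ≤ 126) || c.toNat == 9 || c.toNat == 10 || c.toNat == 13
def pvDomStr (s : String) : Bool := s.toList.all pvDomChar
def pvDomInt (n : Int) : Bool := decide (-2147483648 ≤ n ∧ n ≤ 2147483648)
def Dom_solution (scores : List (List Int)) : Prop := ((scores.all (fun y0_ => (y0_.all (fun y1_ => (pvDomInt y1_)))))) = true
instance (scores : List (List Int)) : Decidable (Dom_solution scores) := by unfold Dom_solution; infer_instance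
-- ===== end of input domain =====

-- B replaces A's second sort plus the stateful rank-walk by a single counting pass
-- (rank = 1 + number of surviving scores with a strictly larger sum); objective: simpler.
-- Both programs share the first phase verbatim (sort by (-a, b), adjacent-pair removal set).

-- ===== PORT A =====
-- shared phase-1 helpers (this code is verbatim identical in Source A and Source B)
def pvKey1 (x : List Int) : Int := -(PySem.List.pyGetD x 0 0)
def pvKey2 (x : List Int) : Int := PySem.List.pyGetD x 1 0

-- 'for i in range(1, len(scores)): a1,b1 = scores[i-1]; a2,b2 = scores[i]; if a1>a2 and b1>b2: to_remove.add(scores[i])'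
-- as a walk over adjacent pairs
def pvRemove : List (List Int) → PySem.Set (List Int) → PySem.Set (List Int)
  | [], acc => acc
  | [_], acc => acc
  | p :: c :: rest, acc =>
      pvRemove (c :: rest)
        (if PySem.List.pyGetD p 0 0 > PySem.List.pyGetD c 0 0 ∧
            PySem.List.pyGetD p 1 0 > PySem.List.pyGetD c 1 0
         then PySem.Set.add acc c else acc)

-- A's ranking loop: prev score p, index i, current rank r (early return = some)
def pvWalk (wh : List Int) : List Int → Int → Int → List (List Int) → Option Int
  | _, _, _, [] => none
  | p, i, r, c :: rest =>
      if c == wh then some (if p.sum > c.sum then i + 1 else r)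
      else pvWalk wh c (i + 1) (if p.sum > c.sum then i + 1 else r) rest

def solution (scores : List (List Int)) : Int :=
  let wh := scores.headD []                                   -- scores[0] (Pre_ excludes [])
  let ss := PySem.List.sorted2 scores pvKey1 pvKey2           -- sort by (-x[0], x[1])
  let toRemove := pvRemove ss PySem.Set.empty
  if PySem.Set.contains toRemove wh then -1
  else
    let survivors := ss.filter (fun s => !(PySem.Set.contains toRemove s))
    let ranked := PySem.List.sorted survivors (fun x => -(x.sum)) false
    match ranked with
    | [] => 0   -- unreachable under Pre_: wh always survives, so 'ranked' is nonempty
    | x :: rest => if x == wh then 1 else (pvWalk wh x 1 1 rest).getD 0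

-- ===== PORT B =====
def solution_alt (scores : List (List Int)) : Int :=
  let wh := scores.headD []
  let ss := PySem.List.sorted2 scores pvKey1 pvKey2
  let toRemove := pvRemove ss PySem.Set.empty
  if PySem.Set.contains toRemove wh then -1
  else
    let whSum := wh.sum
    1 + (ss.countP
          (fun s => !(PySem.Set.contains toRemove s) && decide (s.sum > whSum)) : Int)

-- ===== PRECONDITION & SPEC =====
-- Pre_ is exactly where the Python returns: a nonempty list whose rows all have length 2
-- (with a single row, length ≥ 2 suffices: the unpacking loop never runs); otherwise A
-- raises IndexError (scores[0] / x[1]) or ValueError (unpacking a row of length ≠ 2).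
def Pre_solution (scores : List (List Int)) : Prop :=
  scores ≠ [] ∧
    ((scores.length = 1 ∧ ∀ s ∈ scores, 2 ≤ s.length) ∨ (∀ s ∈ scores, s.length = 2))
instance (scores : List (List Int)) : Decidable (Pre_solution scores) := by
  unfold Pre_solution; infer_instance

def pvWitness_solution : List (List Int) := [[2, 2], [1, 4], [4, 5], [3, 6], [5, 1]]

def Spec_solution (scores : List (List Int)) (out : Int) : Prop := out = solution_alt scores
instance (scores : List (List Int)) (out : Int) : Decidable (Spec_solution scores out) := by
  unfold Spec_solution; infer_instance

-- ===== CLAIM (what is proved, stated in full; the proofs are below) =====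
def Claim_equal_solution : Prop :=
  ∀ (scores : List (List Int)), Dom_solution scores → Pre_solution scores →
    Spec_solution scores (solution scores)

-- ===== LEMMAS AND PROOFS =====

-- number of scores in l whose sum is strictly greater than t
def cntGT (l : List (List Int)) (t : Int) : Int :=
  (l.countP (fun s => decide (t < s.sum)) : Int)

theorem cntGT_cons (x : List Int) (l : List (List Int)) (t : Int) :
    cntGT (x :: l) t = (if t < x.sum then 1 else 0) + cntGT l t := by
  by_cases h : t < x.sum
  · simp only [cntGT, List.countP_cons, h, decide_true, if_true]
    push_cast; ring
  · simp only [cntGT, List.countP_cons, h, decide_false, if_false]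
    push_cast; ring

theorem cntGT_append (l₁ l₂ : List (List Int)) (t : Int) :
    cntGT (l₁ ++ l₂) t = cntGT l₁ t + cntGT l₂ t := by
  simp [cntGT, List.countP_append]

theorem cntGT_eq_zero {l : List (List Int)} {t : Int} (h : ∀ s ∈ l, s.sum ≤ t) :
    cntGT l t = 0 := by
  simp only [cntGT]
  have : l.countP (fun s => decide (t < s.sum)) = 0 :=
    List.countP_eq_zero.mpr (by intro s hs; simpa using not_lt.mpr (h s hs))
  simp [this]

theorem cntGT_eq_length {l : List (List Int)} {t : Int} (h : ∀ s ∈ l, t < s.sum) :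
    cntGT l t = l.length := by
  simp only [cntGT]
  have : l.countP (fun s => decide (t < s.sum)) = l.length :=
    List.countP_eq_length.mpr (by intro s hs; simpa using h s hs)
  simp [this]

theorem cntGT_congr {l : List (List Int)} {t t' : Int} (h : t = t') :
    cntGT l t = cntGT l t' := by rw [h]

theorem cntGT_perm {l l' : List (List Int)} (h : l.Perm l') (t : Int) :
    cntGT l t = cntGT l' t := by
  simp [cntGT, h.countP_eq]

-- sums bounded by the head of a sum-nonincreasing list
theorem sum_le_head {c : List Int} {l : List (List Int)}
    (h : ∀ s ∈ l, (s.sum : Int) ≤ c.sum) : ∀ s ∈ c :: l, (s.sum : Int) ≤ c.sum := by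
  intro s hs
  rcases List.mem_cons.mp hs with rfl | hs
  · exact le_refl _
  · exact h s hs

-- invariant of A's ranking loop on a sum-nonincreasing list:
-- with processed prefix 'pre' and previous element p, i = |pre| + 1 and
-- r = 1 + #{sums > p.sum}; the loop returns 1 + #{sums > wh.sum}.
theorem pvWalk_spec (wh : List Int) :
    ∀ (suf pre : List (List Int)) (p : List Int) (i r : Int),
      (pre ++ p :: suf).Pairwise (fun a b => (b.sum : Int) ≤ a.sum) →
      wh ∈ suf →
      i = (pre.length : Int) + 1 →
      r = 1 + cntGT (pre ++ p :: suf) p.sum →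
      pvWalk wh p i r suf = some (1 + cntGT (pre ++ p :: suf) wh.sum) := by
  intro suf
  induction suf with
  | nil => intro pre p i r _ hm _ _; cases hm
  | cons c suf' ih =>
    intro pre p i r hpw hm hi hr
    have hsplit := List.pairwise_append.mp hpw
    have hpre_ge : ∀ q ∈ pre, (p.sum : Int) ≤ q.sum := by
      intro q hq; exact hsplit.2.2 q hq p (by simp)
    have htail := hsplit.2.1
    have hpc : (c.sum : Int) ≤ p.sum := (List.pairwise_cons.mp htail).1 c (by simp)
    have hc_suf : ∀ s ∈ suf', (s.sum : Int) ≤ c.sum := by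
      have h2 := (List.pairwise_cons.mp htail).2
      exact fun s hs => (List.pairwise_cons.mp h2).1 s hs
    -- the updated rank equals 1 + #{sums > c.sum} over the whole list
    have hrank : (if p.sum > c.sum then i + 1 else r)
        = 1 + cntGT (pre ++ p :: c :: suf') c.sum := by
      split_ifs with hgt
      · have h1 : cntGT pre c.sum = (pre.length : Int) :=
          cntGT_eq_length (fun q hq => lt_of_lt_of_le hgt (hpre_ge q hq))
        have h2 : cntGT (c :: suf') c.sum = 0 := cntGT_eq_zero (sum_le_head hc_suf)
        rw [cntGT_append, cntGT_cons, h1, h2, if_pos hgt, hi]; ring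
      · have heq : (p.sum : Int) = c.sum := le_antisymm (not_lt.mp hgt) hpc
        rw [hr, cntGT_congr heq]
    by_cases hcw : c = wh
    · subst hcw
      simp only [pvWalk, BEq.rfl, if_true, hrank]
    · have hcw' : (c == wh) = false := by simp [hcw]
      have hm' : wh ∈ suf' := by
        rcases List.mem_cons.mp hm with rfl | h
        · exact absurd rfl hcw
        · exact h
      simp only [pvWalk, hcw', Bool.false_eq_true, if_false]
      have hassoc : pre ++ p :: c :: suf' = (pre ++ [p]) ++ c :: suf' := by simp
      rw [hassoc] at hpw hrank ⊢
      have hi' : i + 1 = (((pre ++ [p]).length : Nat) : Int) + 1 := by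
        rw [List.length_append, List.length_singleton, hi]; push_cast; ring
      exact ih (pre ++ [p]) c (i + 1) _ hpw hm' hi' hrank

-- A's whole ranking phase equals B's counting pass, on any list containing wh
theorem ranking_eq (wh : List Int) (l : List (List Int)) (hm : wh ∈ l) :
    (match PySem.List.sorted l (fun x => -(x.sum)) false with
     | [] => (0 : Int)
     | x :: rest => if x == wh then 1 else (pvWalk wh x 1 1 rest).getD 0)
    = 1 + cntGT l wh.sum := by
  have hperm : (PySem.List.sorted l (fun x => -(x.sum)) false).Perm l :=
    PySem.List.sorted_perm l _ false
  have hm' : wh ∈ PySem.List.sorted l (fun x => -(x.sum)) false := hperm.mem_iff.mpr hm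
  have hpair : (PySem.List.sorted l (fun x => -(x.sum)) false).Pairwise
      (fun a b => (b.sum : Int) ≤ a.sum) := by
    have := PySem.List.sorted_pairwise l (fun x => -(x.sum))
    exact this.imp (by intro a b h; omega)
  rw [← cntGT_perm hperm]
  cases hsl : PySem.List.sorted l (fun x => -(x.sum)) false with
  | nil => rw [hsl] at hm'; cases hm'
  | cons x rest =>
    rw [hsl] at hm' hpair
    have hx_max : ∀ s ∈ rest, (s.sum : Int) ≤ x.sum := fun s hs =>
      (List.pairwise_cons.mp hpair).1 s hs
    show (if (x == wh) = true then (1 : Int) else (pvWalk wh x 1 1 rest).getD 0)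
        = 1 + cntGT (x :: rest) wh.sum
    by_cases hxw : x = wh
    · subst hxw
      have h0 : cntGT (x :: rest) x.sum = 0 := cntGT_eq_zero (sum_le_head hx_max)
      simp [h0]
    · have hxw' : (x == wh) = false := by simp [hxw]
      have hm'' : wh ∈ rest := by
        rcases List.mem_cons.mp hm' with rfl | h
        · exact absurd rfl hxw
        · exact h
      rw [hxw']
      simp only [Bool.false_eq_true, if_false]
      have h0 : (1 : Int) = 1 + cntGT ([] ++ x :: rest) x.sum := by
        rw [List.nil_append, cntGT_eq_zero (sum_le_head hx_max)]
        ring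
      have hw := pvWalk_spec wh rest [] x 1 1 (by simpa using hpair) hm'' (by simp) h0
      rw [List.nil_append] at hw
      rw [hw]
      simp

theorem solution_spec_aux (scores : List (List Int)) (hne : scores ≠ []) :
    solution scores = solution_alt scores := by
  unfold solution solution_alt
  by_cases hc : PySem.Set.contains (pvRemove (PySem.List.sorted2 scores pvKey1 pvKey2)
      PySem.Set.empty) (scores.headD []) = true
  · simp only [hc, if_true]
  · rw [Bool.not_eq_true] at hc
    simp only [hc, Bool.false_eq_true, if_false]
    set wh := scores.headD [] with hwh
    set ss := PySem.List.sorted2 scores pvKey1 pvKey2 with hss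
    set R := pvRemove ss PySem.Set.empty with hR
    have hwm : wh ∈ scores := by
      cases scores with
      | nil => exact absurd rfl hne
      | cons h t => simp [hwh]
    have hwss : wh ∈ ss :=
      ((PySem.List.sorted2_perm scores pvKey1 pvKey2 false).mem_iff).mpr hwm
    have hwsurv : wh ∈ ss.filter (fun s => !(PySem.Set.contains R s)) := by
      rw [List.mem_filter]
      refine ⟨hwss, ?_⟩
      rw [Bool.not_eq_eq_eq_not]
      simpa using hc
    have hcnt : (ss.countP
          (fun s => !(PySem.Set.contains R s) && decide (s.sum > wh.sum)) : Int)
        = cntGT (ss.filter (fun s => !(PySem.Set.contains R s))) wh.sum := by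
      simp only [cntGT, List.countP_filter]
      congr 1
      apply List.countP_congr
      intro s _
      simp [Bool.and_comm]
    rw [hcnt]
    exact ranking_eq wh _ hwsurv

-- ===== VERDICT (by name: the statement is the Claim_ definition above) =====
theorem solution_spec : Claim_equal_solution := by
  intro scores _ hpre
  exact solution_spec_aux scores hpre.1
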